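-- pv_equiv track=rewrite | github.com/kshitijl/wordle-solver | consecutive.py | count_consecutive_consonants
-- ===== SOURCE A (Python) =====
-- def count_consecutive_consonants(word):
--     vowels = "aeiou"
--     max_consecutive = 0
--     current_consecutive = 0
--
--     for char in word.lower():
--         if char.isalpha() and char not in vowels:
--             current_consecutive += 1
--             max_consecutive = max(max_consecutive, current_consecutive)
--         else:
--             current_consecutive = 0
--
--     return max_consecutive
-- ===== SOURCE B (Python) =====
-- def count_consecutive_consonants(word):
--     # Run-splitting two-pointer scan: find each maximal consonant run and
--     # take the longest, instead of A's per-character running-max accumulator.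
--     vowels = "aeiou"
--
--     def is_cons(c):
--         return c.isalpha() and c not in vowels
--
--     w = word.lower()
--     n = len(w)
--     best = 0
--     i = 0
--     while i < n:
--         if is_cons(w[i]):
--             j = i
--             while j < n and is_cons(w[j]):
--                 j += 1
--             if j - i > best:
--                 best = j - i
--             i = j
--         else:
--             i += 1
--     return best
-- ===== Notes on version B (the rewrite author's own statement) =====
-- stated objective: alternative
-- what changed: Replaces A's per-character running-max accumulator with a two-pointer scan that locates each maximal consonant run in one inner sweep and keeps only the longest run length.
import Mathlib
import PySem

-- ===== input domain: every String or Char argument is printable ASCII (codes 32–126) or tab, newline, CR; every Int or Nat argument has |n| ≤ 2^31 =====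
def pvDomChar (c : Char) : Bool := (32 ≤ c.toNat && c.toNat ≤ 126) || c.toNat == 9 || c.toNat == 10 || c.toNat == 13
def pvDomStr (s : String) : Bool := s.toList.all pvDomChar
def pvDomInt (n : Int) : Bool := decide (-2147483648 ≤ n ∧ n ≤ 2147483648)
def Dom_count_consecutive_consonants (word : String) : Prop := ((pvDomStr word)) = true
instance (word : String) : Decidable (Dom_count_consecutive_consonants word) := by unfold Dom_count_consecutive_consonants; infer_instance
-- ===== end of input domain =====

-- B replaces A's per-character running-max accumulator with a two-pointer scan over
-- maximal consonant runs (alternative decomposition, same asymptotic cost).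


-- ===== PORT A =====
-- vowels = "aeiou", membership of a single char ported as list membership
def cccVowels : List Char := ['a', 'e', 'i', 'o', 'u']

-- char.isalpha() and char not in vowels
def cccIsCons (c : Char) : Bool := PySem.Chars.isalpha c && !(cccVowels.contains c)

-- the for-loop over word.lower() with state (max_consecutive, current_consecutive)
def count_consecutive_consonants (word : String) : Int :=
  (((PySem.Str.lower word).toList.foldl
      (fun (s : Int × Int) c =>
        if cccIsCons c then
          (max s.1 (s.2 + 1), s.2 + 1)
        else
          (s.1, (0 : Int)))
      ((0 : Int), (0 : Int)))).1

-- ===== PORT B =====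
-- outer while-loop of Source B: at a consonant, the inner while-loop advances j to the end of
-- the maximal consonant run (takeWhile/dropWhile), updates best, and resumes after the run
def cccRuns (l : List Char) (best : Int) : Int :=
  match l with
  | [] => best
  | c :: t =>
    if cccIsCons c then
      let run := t.takeWhile cccIsCons
      let rest := t.dropWhile cccIsCons
      let len : Int := (run.length : Int) + 1
      cccRuns rest (if len > best then len else best)
    else
      cccRuns t best
termination_by l.length
decreasing_by
  · exact Nat.lt_succ_of_le (List.length_dropWhile_le _ _)
  · exact Nat.lt_succ_self _

def count_consecutive_consonants_alt (word : String) : Int :=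
  cccRuns (PySem.Str.lower word).toList 0

-- ===== PRECONDITION & SPEC =====
def Spec_count_consecutive_consonants (word : String) (out : Int) : Prop := out = count_consecutive_consonants_alt word
instance (word : String) (out : Int) : Decidable (Spec_count_consecutive_consonants word out) := by unfold Spec_count_consecutive_consonants; infer_instance

-- ===== CLAIM (what is proved, stated in full; the proofs are below) =====
def Claim_equal_count_consecutive_consonants : Prop := ∀ (word : String), Dom_count_consecutive_consonants word → Spec_count_consecutive_consonants word (count_consecutive_consonants word)

-- ===== LEMMAS AND PROOFS =====

-- the longest consonant run in l, given a current open run of length cur at the front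
def cccH (cur : Int) (l : List Char) : Int :=
  match l with
  | [] => cur
  | c :: t => if cccIsCons c then cccH (cur + 1) t else max cur (cccH 0 t)

theorem cccH_nil (cur : Int) : cccH cur [] = cur := rfl

theorem cccH_cons (cur : Int) (c : Char) (t : List Char) :
    cccH cur (c :: t) = if cccIsCons c then cccH (cur + 1) t else max cur (cccH 0 t) := rfl

theorem cccH_ge (cur : Int) (l : List Char) : cur ≤ cccH cur l := by
  induction l generalizing cur with
  | nil => simp [cccH_nil]
  | cons c t ih =>
    rw [cccH_cons]
    split
    · exact le_trans (by omega) (ih (cur + 1))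
    · omega

theorem cccA_loop (l : List Char) (m cur : Int) (h0 : 0 ≤ cur) (h1 : cur ≤ m) :
    (l.foldl
      (fun (s : Int × Int) c =>
        if cccIsCons c then (max s.1 (s.2 + 1), s.2 + 1) else (s.1, (0 : Int)))
      (m, cur)).1 = max m (cccH cur l) := by
  induction l generalizing m cur with
  | nil => simp [cccH_nil]; omega
  | cons c t ih =>
    rw [List.foldl_cons, cccH_cons]
    by_cases hk : cccIsCons c = true
    · rw [if_pos hk, if_pos hk, ih (max m (cur + 1)) (cur + 1) (by omega) (by omega)]
      have := cccH_ge (cur + 1) t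
      omega
    · rw [if_neg hk, if_neg hk, ih m 0 (by omega) (by omega)]
      have := cccH_ge (0 : Int) t
      omega

-- pushing cccH through a block of consonants
theorem cccH_run (r : List Char) (hr : ∀ x ∈ r, cccIsCons x = true) (cur : Int) (s : List Char) :
    cccH cur (r ++ s) = cccH (cur + r.length) s := by
  induction r generalizing cur with
  | nil => simp
  | cons c t ih =>
    have hc : cccIsCons c = true := hr c (by simp)
    rw [List.cons_append, cccH_cons, if_pos hc,
      ih (fun x hx => hr x (by simp [hx])) (cur + 1)]
    congr 1
    simp only [List.length_cons]
    omega

-- when the list does not start with a consonant, an open run closes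
theorem cccH_close (s : List Char)
    (hs : s = [] ∨ ∃ d t', s = d :: t' ∧ cccIsCons d = false) (n : Int) (hn : 0 ≤ n) :
    cccH n s = max n (cccH 0 s) := by
  rcases hs with h | ⟨d, t', rfl, hd⟩
  · subst h; rw [cccH_nil, cccH_nil]; omega
  · rw [cccH_cons, cccH_cons, if_neg (by simp [hd]), if_neg (by simp [hd])]
    have := cccH_ge (0 : Int) t'
    omega

theorem cccRuns_eq (l : List Char) (best : Int) (hb : 0 ≤ best) :
    cccRuns l best = max best (cccH 0 l) := by
  fun_induction cccRuns l best with
  | case1 best => rw [cccH_nil]; omega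
  | case2 best c t hk run rest len ih =>
    simp only [dite_eq_ite] at ih
    have hge := cccH_ge (0 : Int) rest
    have hlen : (0 : Int) ≤ (run.length : Int) + 1 := by positivity
    rw [ih (by simp only [len]; split_ifs <;> omega)]
    have ht : t = run ++ rest := (List.takeWhile_append_dropWhile (p := cccIsCons) (l := t)).symm
    have hrun : ∀ x ∈ run, cccIsCons x = true := fun x hx => List.mem_takeWhile_imp hx
    have hrest : rest = [] ∨ ∃ d t', rest = d :: t' ∧ cccIsCons d = false := by
      cases hrest : rest with
      | nil => exact Or.inl rfl
      | cons d t' =>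
        refine Or.inr ⟨d, t', rfl, ?_⟩
        have := List.head?_dropWhile_not cccIsCons t
        simp only [rest] at hrest
        simp [hrest] at this
        exact this
    rw [cccH_cons, if_pos hk, ht, cccH_run run hrun (0 + 1) rest,
      cccH_close rest hrest (0 + 1 + run.length) (by positivity)]
    simp only [len]
    split_ifs <;> omega
  | case3 best c t hk ih =>
    rw [ih hb, cccH_cons, if_neg hk]
    have := cccH_ge (0 : Int) t
    omega

-- ===== VERDICT (by name: the statement is the Claim_ definition above) =====
theorem count_consecutive_consonants_spec : Claim_equal_count_consecutive_consonants := by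
  intro word _
  unfold Spec_count_consecutive_consonants count_consecutive_consonants count_consecutive_consonants_alt
  rw [cccA_loop _ 0 0 le_rfl le_rfl, cccRuns_eq _ 0 le_rfl]
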